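-- pv_equiv track=rewrite | github.com/jpbruneton/QDSR | core/Simplification_Rules.py | simplify_1_op
-- ===== SOURCE A (Python) =====
-- def simplify_1_op(pf):
--     if len(pf) <=1:
--         return pf
--     newpf = []
--     i = 0
--     while i <= len(pf) - 2:
--         if pf[i] in ['1'] and pf[i + 1] in ['*', '/']:
--             i += 2 #empty operation
--             break
--         else:
--             newpf.append(pf[i])
--             i += 1
--     newpf += pf[i:]
--     return newpf
-- ===== SOURCE B (Python) =====
-- def simplify_1_op(pf):
--     if len(pf) <= 1:
--         return pf
--     i = next((k for k, (a, b) in enumerate(zip(pf, pf[1:]))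
--               if a == '1' and b in ('*', '/')), None)
--     if i is None:
--         return pf[:]
--     return pf[:i] + pf[i + 2:]
-- ===== Notes on version B (the rewrite author's own statement) =====
-- stated objective: alternative
-- what changed: Replaces A's index-based copy-as-you-go while loop with accumulator by a locate-then-splice over enumerate(zip(pf, pf[1:])): find the first adjacent pair ('1', op) and return pf[:i] + pf[i+2:], or a plain copy if none.
import Mathlib
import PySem

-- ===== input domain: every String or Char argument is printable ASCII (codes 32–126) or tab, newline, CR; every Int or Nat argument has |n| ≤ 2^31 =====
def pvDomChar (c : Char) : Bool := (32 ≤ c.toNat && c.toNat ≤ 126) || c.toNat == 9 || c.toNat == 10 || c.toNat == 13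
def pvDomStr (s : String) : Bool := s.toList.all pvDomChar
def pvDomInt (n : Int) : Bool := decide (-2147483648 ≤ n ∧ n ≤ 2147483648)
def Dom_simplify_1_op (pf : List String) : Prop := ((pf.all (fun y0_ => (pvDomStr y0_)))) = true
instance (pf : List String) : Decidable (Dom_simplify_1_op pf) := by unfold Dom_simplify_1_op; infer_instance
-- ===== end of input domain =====

-- B replaces A's index-based copy-as-you-go while loop by locate-then-splice over
-- enumerate(zip(pf, pf[1:])): find the first adjacent pair ('1', op) and splice it
-- out; same return value, different decomposition.


-- ===== PORT A =====
-- the while loop of A: builds newpf element by element; on the first match skips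
-- two positions and breaks, then appends the remaining suffix pf[i:]
def simplify1Loop (pf : List String) (newpf : List String) (i : Nat) : List String :=
  if _h : i + 2 ≤ pf.length then
    if pf.getD i "" = "1" ∧ (pf.getD (i + 1) "" = "*" ∨ pf.getD (i + 1) "" = "/") then
      newpf ++ pf.drop (i + 2)
    else
      simplify1Loop pf (newpf ++ [pf.getD i ""]) (i + 1)
  else
    newpf ++ pf.drop i
termination_by pf.length - i

def simplify_1_op (pf : List String) : List String :=
  if pf.length ≤ 1 then pf
  else simplify1Loop pf [] 0

-- ===== PORT B =====
-- B's generator: the first (index, pair) of enumerate(zip(pf, pf[1:])) whose pair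
-- is ('1', '*') or ('1', '/')
def firstOnePair (pf : List String) : Option (Int × (String × String)) :=
  (PySem.List.enumerate (pf.zip (pf.drop 1)) 0).find?
    (fun p => p.2.1 == "1" && (p.2.2 == "*" || p.2.2 == "/"))

def simplify_1_op_alt (pf : List String) : List String :=
  if pf.length ≤ 1 then pf
  else
    match firstOnePair pf with
    | none => pf                                   -- pf[:] — same value as pf
    | some (i, _) => pf.take i.toNat ++ pf.drop (i.toNat + 2)   -- i ≥ 0 from enumerate

-- ===== PRECONDITION & SPEC =====
def Spec_simplify_1_op (pf : List String) (out : List String) : Prop := out = simplify_1_op_alt pf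
instance (pf : List String) (out : List String) : Decidable (Spec_simplify_1_op pf out) := by unfold Spec_simplify_1_op; infer_instance

-- ===== CLAIM (what is proved, stated in full; the proofs are below) =====
def Claim_equal_simplify_1_op : Prop := ∀ (pf : List String), Dom_simplify_1_op pf → Spec_simplify_1_op pf (simplify_1_op pf)

-- ===== LEMMAS AND PROOFS =====

-- proof-only canonical form of the result: structural recursion splicing the
-- first '1' followed by '*'/'/'
def goCanon : List String → List String
  | [] => []
  | [x] => [x]
  | x :: y :: rest =>
      if x = "1" ∧ (y = "*" ∨ y = "/") then rest
      else x :: goCanon (y :: rest)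

lemma goCanon_short (xs : List String) (h : xs.length ≤ 1) : goCanon xs = xs := by
  match xs with
  | [] => rfl
  | [x] => rfl
  | x :: y :: rest => simp at h

lemma drop_add_two {A : Type} (m : Nat) (x y : A) (l : List A) :
    List.drop (m + 2) (x :: y :: l) = List.drop m l := by
  rw [show m + 2 = m + 1 + 1 by omega, List.drop_succ_cons, List.drop_succ_cons]

lemma drop_cons' (pf : List String) (i : Nat) (h : i < pf.length) :
    pf.drop i = pf.getD i "" :: pf.drop (i + 1) := by
  rw [List.getD_eq_getElem pf _ h]
  exact (List.drop_eq_getElem_cons h)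

-- A's loop from position i with accumulator newpf produces newpf ++ goCanon (pf.drop i)
lemma loop_eq_goCanon (pf : List String) (newpf : List String) (i : Nat) :
    simplify1Loop pf newpf i = newpf ++ goCanon (pf.drop i) := by
  induction newpf, i using simplify1Loop.induct pf with
  | case1 newpf i hlen hc =>
      rw [simplify1Loop, dif_pos hlen, if_pos hc]
      rw [drop_cons' pf i (by omega), drop_cons' pf (i + 1) (by omega)]
      rw [goCanon, if_pos hc]
  | case2 newpf i hlen hc ih =>
      rw [simplify1Loop, dif_pos hlen, if_neg hc, ih]
      rw [drop_cons' pf i (by omega), drop_cons' pf (i + 1) (by omega)]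
      rw [goCanon, if_neg hc]
      rw [← drop_cons' pf (i + 1) (by omega)]
      simp
  | case3 newpf i hlen =>
      rw [simplify1Loop, dif_neg hlen]
      rw [goCanon_short (pf.drop i) (by simp; omega)]

-- the found index of find? over enumerate is ≥ the start
lemma find?_enumerate_ge {α : Type} (xs : List α) (s : Nat) (pred : Int × α → Bool)
    (i : Int) (v : α)
    (h : (PySem.List.enumerate xs (s : Int)).find? pred = some (i, v)) :
    (s : Int) ≤ i := by
  have hm := List.mem_of_find?_eq_some h
  rw [PySem.List.mem_enumerate_iff] at hm
  obtain ⟨k, hk, hp⟩ := hm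
  have : i = (s : Int) + k := by
    have := congrArg Prod.fst hp; simpa using this
  omega

-- B's locate-then-splice, generalized over the enumerate start, equals goCanon
lemma find_splice_eq_goCanon (xs : List String) (s : Nat) :
    (match (PySem.List.enumerate (xs.zip (xs.drop 1)) (s : Int)).find?
        (fun p => p.2.1 == "1" && (p.2.2 == "*" || p.2.2 == "/")) with
     | none => xs
     | some (i, _) => xs.take (i.toNat - s) ++ xs.drop (i.toNat - s + 2)) = goCanon xs := by
  induction xs generalizing s with
  | nil => simp [goCanon]
  | cons x xs ih =>
      match xs with
      | [] => simp [goCanon]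
      | y :: rest =>
          rw [show (x :: y :: rest).drop 1 = y :: rest from rfl]
          rw [show (x :: y :: rest).zip (y :: rest) = (x, y) :: (y :: rest).zip rest from rfl]
          rw [PySem.List.enumerate_cons]
          by_cases hc : x = "1" ∧ (y = "*" ∨ y = "/")
          · have hpos := List.find?_cons_of_pos
              (p := fun p => p.2.1 == "1" && (p.2.2 == "*" || p.2.2 == "/"))
              (a := ((s : Int), (x, y)))
              (l := PySem.List.enumerate ((y :: rest).zip rest) ((s : Int) + 1))
              (by simp only [beq_iff_eq, Bool.and_eq_true, Bool.or_eq_true]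
                  exact ⟨hc.1, hc.2⟩)
            rw [hpos]
            simp [goCanon, hc]
          · have hneg := List.find?_cons_of_neg
              (p := fun p => p.2.1 == "1" && (p.2.2 == "*" || p.2.2 == "/"))
              (a := ((s : Int), (x, y)))
              (l := PySem.List.enumerate ((y :: rest).zip rest) ((s : Int) + 1))
              (by simp only [beq_iff_eq, Bool.and_eq_true, Bool.or_eq_true]
                  exact fun h => hc ⟨h.1, h.2⟩)
            rw [hneg]
            have ih' := ih (s + 1)
            rw [show (y :: rest).drop 1 = rest from rfl] at ih'
            push_cast at ih'
            cases hj : (PySem.List.enumerate ((y :: rest).zip rest) ((s : Int) + 1)).find?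
                (fun p => p.2.1 == "1" && (p.2.2 == "*" || p.2.2 == "/")) with
            | none =>
                rw [hj] at ih'
                have ihn : y :: rest = goCanon (y :: rest) := by simpa using ih'
                show x :: y :: rest = goCanon (x :: y :: rest)
                rw [goCanon, if_neg hc, ← ihn]
            | some p =>
                obtain ⟨i, v⟩ := p
                rw [hj] at ih'
                have ihs : (y :: rest).take (i.toNat - (s + 1)) ++
                    rest.drop (i.toNat - (s + 1) + 1) = goCanon (y :: rest) := by
                  simpa using ih'
                have hge : ((s : Int) + 1) ≤ i := by
                  have := find?_enumerate_ge ((y :: rest).zip rest) (s + 1)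
                    (fun p => p.2.1 == "1" && (p.2.2 == "*" || p.2.2 == "/")) i v
                    (by push_cast; exact hj)
                  push_cast at this; exact this
                show List.take (i.toNat - s) (x :: y :: rest) ++
                    List.drop (i.toNat - s + 2) (x :: y :: rest) = goCanon (x :: y :: rest)
                rw [goCanon, if_neg hc]
                have h1 : i.toNat - s = (i.toNat - (s + 1)) + 1 := by omega
                rw [h1, List.take_succ_cons,
                  drop_add_two, List.cons_append]
                exact congrArg (x :: ·) ihs

-- ===== VERDICT (by name: the statement is the Claim_ definition above) =====
theorem simplify_1_op_spec : Claim_equal_simplify_1_op := by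
  intro pf _
  unfold Spec_simplify_1_op simplify_1_op simplify_1_op_alt firstOnePair
  by_cases h : pf.length ≤ 1
  · simp [h]
  · rw [if_neg h, if_neg h, loop_eq_goCanon]
    have := find_splice_eq_goCanon pf 0
    simp only [Nat.cast_zero, Nat.sub_zero] at this
    rw [List.drop_zero, List.nil_append, ← this]
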